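-- pv_equiv track=rewrite | github.com/javianng/thecode_CS1010X | Side_Quest/sidequest10.1/sidequest10.1-template.py | merge_up
-- ===== SOURCE A (Python) =====
-- def transpose(mat):
--     new_mat = []
--     for i in range(len(mat[0])):
--         row = list(map(lambda lst: lst[i], mat))
--         new_mat.append(row)
--     return new_mat
--
-- def merge_up(mat):
--
--     transpose_mat = transpose(mat)
--
--     increment = []
--
--     def merge_left_row(row):
--         result_row = []
--         correct_len = len(row)
--
--         def helper(row):
--             current_tile = row[0]
--             if len(row) == 1: # if one last element, add to current tile
--                 result_row.append(current_tile)
--             elif len(row) == 0: # if no elements, end helper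
--                 return []
--             elif current_tile == 0: # for all cases of 0, the next number is then considered
--                 return helper(row[1:len(row)])
--             elif len(row) == 2: # if two elements left to consider
--                 next_tile = row[1]
--                 if current_tile == next_tile:
--                     result_row.append(current_tile*2)
--                     increment.append(current_tile*2)
--                 elif current_tile != next_tile:
--                     result_row.append(current_tile)
--                     return helper(row[1:len(row)])
--             elif len(row) > 2:
--                 next_tile = row[1]
--                 if current_tile == next_tile: # if current = next, add them together and look at the rest
--                     result_row.append(current_tile*2)
--                     increment.append(current_tile*2)
--                     return helper(row[2:len(row)])
--                 elif next_tile == 0: # if next = 0, consider current and the rest.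
--                     return helper([current_tile] + row[2:len(row)])
--                 elif current_tile != next_tile: # if next != 0 and current != next, consider rest and append current to result
--                     result_row.append(current_tile)
--                     return helper(row[1:len(row)])
--
--         helper(row)
--         result_len = len(result_row)
--         number_of_zeros = correct_len - result_len
--         result_row += [0]*number_of_zeros
--
--         return result_row
--
--     new_mat = []
--     for row in transpose_mat:
--         new_mat.append(merge_left_row(row))
--     return (transpose(new_mat), transpose(new_mat) != mat, sum(increment))
-- ===== SOURCE B (Python) =====
-- def merge_up(mat):
--     h = len(mat)
--     w = len(mat[0])
--     score = 0
--     cols = []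
--     for j in range(w):
--         col = [mat[i][j] for i in range(h)]
--         nz = [x for x in col if x != 0]
--         merged = []
--         i = 0
--         while i < len(nz):
--             if i + 1 < len(nz) and nz[i] == nz[i + 1]:
--                 merged.append(nz[i] * 2)
--                 score += nz[i] * 2
--                 i += 2
--             else:
--                 merged.append(nz[i])
--                 i += 1
--         merged += [0] * (h - len(merged))
--         cols.append(merged)
--     new = [[cols[j][i] for j in range(w)] for i in range(h)]
--     return (new, new != mat, score)
-- ===== Notes on version B (the rewrite author's own statement) =====
-- stated objective: faster
-- what changed: Replaced the per-column quadratic recursive slicing helper (which rebuilds list slices and re-scans zeros on every step) by a single linear pass per column: filter out zeros once, merge adjacent equal pairs in one scan accumulating the score, then pad with zeros; columns are read by direct indexing instead of transpose/re-transpose list building.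
import Mathlib
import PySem

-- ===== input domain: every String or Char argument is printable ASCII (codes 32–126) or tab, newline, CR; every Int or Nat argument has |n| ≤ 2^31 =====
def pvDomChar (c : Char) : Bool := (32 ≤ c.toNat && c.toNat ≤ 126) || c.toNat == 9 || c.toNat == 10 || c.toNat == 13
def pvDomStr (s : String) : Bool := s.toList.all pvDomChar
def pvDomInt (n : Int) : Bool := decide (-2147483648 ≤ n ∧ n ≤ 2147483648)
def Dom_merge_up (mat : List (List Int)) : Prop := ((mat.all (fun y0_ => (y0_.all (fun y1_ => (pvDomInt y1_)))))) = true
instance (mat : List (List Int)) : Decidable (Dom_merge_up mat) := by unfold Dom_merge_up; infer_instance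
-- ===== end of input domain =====

-- B replaces A's per-column recursive slicing by one linear pass per column
-- (filter zeros, merge adjacent equal pairs, pad); objective: faster.

-- ===== PORT A =====
-- transpose: row i = [lst[i] for lst in mat]; lst.getD i 0 is exact for in-range i
-- (Pre_merge_up guarantees every read index is in range; out of range Python raises).
def pvTranspose (mat : List (List Int)) : List (List Int) :=
  (List.range (mat.headD []).length).map (fun i => mat.map (fun lst => lst.getD i 0))

-- A's inner `helper`, with the mutated closure lists result_row / increment threaded
-- as accumulators `res` / `inc`.  The branch order follows the Python source
-- (len==1, then current==0, then len==2, then len>2), the length tests being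
-- expressed by the pattern match.  Python never calls helper on [].
def pvHelper : List Int → List Int → List Int → List Int × List Int
  | [], res, inc => (res, inc)  -- unreachable: helper is never invoked on an empty row
  | [c], res, inc => (res ++ [c], inc)
  | c :: d :: rest, res, inc =>
    if c = 0 then pvHelper (d :: rest) res inc
    else
      match rest with
      | [] => -- len(row) == 2
        if c = d then (res ++ [c * 2], inc ++ [c * 2])
        else pvHelper [d] (res ++ [c]) inc
      | e :: t => -- len(row) > 2
        if c = d then pvHelper (e :: t) (res ++ [c * 2]) (inc ++ [c * 2])
        else if d = 0 then pvHelper (c :: e :: t) res inc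
        else pvHelper (d :: e :: t) (res ++ [c]) inc
termination_by row _ _ => row.length
decreasing_by all_goals (simp; try omega)

def pvMergeLeftRow (row : List Int) (inc : List Int) : List Int × List Int :=
  let correct_len := row.length
  let (result_row, inc') := pvHelper row [] inc
  (result_row ++ List.replicate (correct_len - result_row.length) 0, inc')

def merge_up (mat : List (List Int)) : List (List Int) × Bool × Int :=
  let transpose_mat := pvTranspose mat
  let (new_mat, increment) := transpose_mat.foldl
    (fun acc row =>
      let p := pvMergeLeftRow row acc.2
      (acc.1 ++ [p.1], p.2))
    (([] : List (List Int)), ([] : List Int))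
  (pvTranspose new_mat, !(pvTranspose new_mat == mat), increment.sum)

-- ===== PORT B =====
-- the while loop of Source B over the zero-free column, as recursion on that list
def altMergeNZ : List Int → List Int × Int
  | [] => ([], 0)
  | [x] => ([x], 0)
  | x :: y :: t =>
    if x = y then
      (x * 2 :: (altMergeNZ t).1, (altMergeNZ t).2 + x * 2)
    else
      (x :: (altMergeNZ (y :: t)).1, (altMergeNZ (y :: t)).2)

def merge_up_alt (mat : List (List Int)) : List (List Int) × Bool × Int :=
  let h := mat.length
  let w := (mat.headD []).length
  let (cols, score) := (List.range w).foldl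
    (fun acc j =>
      let col := (List.range h).map (fun i => (mat.getD i []).getD j 0)
      let nz := col.filter (fun x => x != 0)
      let (m, s) := altMergeNZ nz
      (acc.1 ++ [m ++ List.replicate (h - m.length) 0], acc.2 + s))
    (([] : List (List Int)), (0 : Int))
  let newm := (List.range h).map (fun i => (List.range w).map (fun j => (cols.getD j []).getD i 0))
  (newm, !(newm == mat), score)


-- ===== PRECONDITION & SPEC =====
-- Pre_ = exactly the inputs on which Python A returns: A raises IndexError when the
-- matrix is empty, its first row is empty, or some row is shorter than the first row.
def Pre_merge_up (mat : List (List Int)) : Prop :=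
  mat ≠ [] ∧ (mat.headD []) ≠ [] ∧ ∀ row ∈ mat, (mat.headD []).length ≤ row.length
instance (mat : List (List Int)) : Decidable (Pre_merge_up mat) := by unfold Pre_merge_up; infer_instance

def pvWitness_merge_up : List (List Int) := [[2, 0], [2, 4]]

def Spec_merge_up (mat : List (List Int)) (out : List (List Int) × Bool × Int) : Prop := out = merge_up_alt mat
instance (mat : List (List Int)) (out : List (List Int) × Bool × Int) : Decidable (Spec_merge_up mat out) := by unfold Spec_merge_up; infer_instance

-- ===== CLAIM (what is proved, stated in full; the proofs are below) =====
def Claim_equal_merge_up : Prop := ∀ (mat : List (List Int)), Dom_merge_up mat → Pre_merge_up mat → Spec_merge_up mat (merge_up mat)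

-- ===== LEMMAS AND PROOFS =====

def gInc : List Int → List Int
  | [] => []
  | [_] => []
  | x :: y :: t => if x = y then x * 2 :: gInc t else gInc (y :: t)

theorem pvHelper_eq (r : List Int) (res inc : List Int) (h : r ≠ []) :
    pvHelper r res inc =
      (res ++ (altMergeNZ (r.filter (fun x => x != 0))).1 ++
         (if r.getLast? = some 0 then [0] else []),
       inc ++ gInc (r.filter (fun x => x != 0))) := by
  induction r, res, inc using pvHelper.induct with
  | case1 res inc => exact absurd rfl h
  | case2 c res inc =>
    by_cases hc : c = 0 <;> simp [pvHelper, altMergeNZ, gInc, hc]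
  | case3 d rest res inc ih =>
    have e1 : pvHelper (0 :: d :: rest) res inc = pvHelper (d :: rest) res inc := by
      rw [pvHelper.eq_def]; simp
    rw [e1, ih (by simp)]
    simp [List.getLast?_cons_cons, List.filter_cons]
  | case4 d res inc hd =>
    simp [pvHelper, hd, altMergeNZ, gInc]
  | case5 c d res inc hc hcd ih =>
    have e1 : pvHelper [c, d] res inc = pvHelper [d] (res ++ [c]) inc := by
      rw [pvHelper.eq_def]; simp [hc, hcd]
    rw [e1, ih (by simp)]
    by_cases hd : d = 0 <;> simp [hd, altMergeNZ, gInc, hc, hcd]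
  | case6 d res inc e t hd ih =>
    have e1 : pvHelper (d :: d :: e :: t) res inc
        = pvHelper (e :: t) (res ++ [d * 2]) (inc ++ [d * 2]) := by
      rw [pvHelper.eq_def]; simp [hd]
    rw [e1, ih (by simp)]
    simp [altMergeNZ, gInc, hd, List.filter_cons, List.getLast?_cons_cons]
  | case7 c res inc hc e t hc2 ih =>
    have e1 : pvHelper (c :: 0 :: e :: t) res inc = pvHelper (c :: e :: t) res inc := by
      rw [pvHelper.eq_def]; simp [hc]
    rw [e1, ih (by simp)]
    simp [hc, List.filter_cons, List.getLast?_cons_cons]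
  | case8 c d res inc hc e t hcd hd ih =>
    have e1 : pvHelper (c :: d :: e :: t) res inc
        = pvHelper (d :: e :: t) (res ++ [c]) inc := by
      rw [pvHelper.eq_def]; simp [hc, hcd, hd]
    rw [e1, ih (by simp)]
    simp [altMergeNZ, gInc, hc, hcd, hd, List.filter_cons, List.getLast?_cons_cons]

theorem altMergeNZ_snd (l : List Int) : (altMergeNZ l).2 = (gInc l).sum := by
  induction l using altMergeNZ.induct <;> · simp_all [altMergeNZ, gInc]; try omega

theorem altMergeNZ_len (l : List Int) : (altMergeNZ l).1.length ≤ l.length := by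
  induction l using altMergeNZ.induct <;> · simp_all [altMergeNZ]; try omega

-- the merged-and-padded column B produces (used to characterise both sides)
def pvCol (r : List Int) : List Int :=
  (altMergeNZ (r.filter (fun x => x != 0))).1 ++
    List.replicate (r.length - (altMergeNZ (r.filter (fun x => x != 0))).1.length) 0

def pvIncs (r : List Int) : List Int := gInc (r.filter (fun x => x != 0))

theorem filter_lt_of_last_zero (r : List Int) (h : r.getLast? = some 0) :
    (r.filter (fun x => x != 0)).length < r.length := by
  induction r with
  | nil => simp at h
  | cons a l ih =>
    cases l with
    | nil =>
      simp at h; subst h; simp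
    | cons b m =>
      rw [List.getLast?_cons_cons] at h
      have := ih h
      by_cases ha : a = 0 <;> simp [List.filter_cons, ha] at this ⊢ <;> omega

theorem pvCol_length (r : List Int) : (pvCol r).length = r.length := by
  have h1 := altMergeNZ_len (r.filter (fun x => x != 0))
  have h2 := List.length_filter_le (fun x => x != 0) r
  simp [pvCol]; omega

theorem pvMergeLeftRow_eq (r inc : List Int) (h : r ≠ []) :
    pvMergeLeftRow r inc = (pvCol r, inc ++ pvIncs r) := by
  rw [pvMergeLeftRow]
  rw [pvHelper_eq r [] inc h]
  simp only [pvCol, pvIncs, List.nil_append]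
  by_cases hz : r.getLast? = some 0
  · have h1 := altMergeNZ_len (r.filter (fun x => x != 0))
    have h2 := filter_lt_of_last_zero r hz
    have hlen : r.length - (altMergeNZ (List.filter (fun x => x != 0) r)).1.length
        = (r.length - ((altMergeNZ (List.filter (fun x => x != 0) r)).1.length + 1)) + 1 := by
      omega
    simp [hz, hlen, List.replicate_succ]
  · simp [hz]

theorem foldA (rows : List (List Int)) (acc1 : List (List Int)) (acc2 : List Int)
    (h : ∀ r ∈ rows, r ≠ []) :
    rows.foldl (fun acc row =>
      let p := pvMergeLeftRow row acc.2
      (acc.1 ++ [p.1], p.2)) (acc1, acc2)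
    = (acc1 ++ rows.map pvCol, acc2 ++ rows.flatMap pvIncs) := by
  induction rows generalizing acc1 acc2 with
  | nil => simp
  | cons r rest ih =>
    rw [List.foldl_cons]
    simp only
    rw [pvMergeLeftRow_eq r acc2 (h r (by simp))]
    rw [ih _ _ (fun x hx => h x (by simp [hx]))]
    simp

theorem map_eq_range_getD {α β : Type} (l : List α) (d : α) (f : α → β) :
    l.map f = (List.range l.length).map (fun i => f (l.getD i d)) := by
  apply List.ext_getElem
  · simp
  · intro i h1 h2
    simp at h1 ⊢
    rw [List.getElem?_eq_getElem h1]
    rfl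

theorem foldB (mat : List (List Int)) (js : List Nat) (acc1 : List (List Int)) (acc2 : Int) :
    js.foldl (fun acc j =>
      let col := (List.range mat.length).map (fun i => (mat.getD i []).getD j 0)
      let nz := col.filter (fun x => x != 0)
      let ms := altMergeNZ nz
      (acc.1 ++ [ms.1 ++ List.replicate (mat.length - ms.1.length) 0], acc.2 + ms.2)) (acc1, acc2)
    = (acc1 ++ js.map (fun j => pvCol ((List.range mat.length).map (fun i => (mat.getD i []).getD j 0))),
       acc2 + (js.map (fun j => (pvIncs ((List.range mat.length).map (fun i => (mat.getD i []).getD j 0))).sum)).sum) := by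
  induction js generalizing acc1 acc2 with
  | nil => simp
  | cons j rest ih =>
    rw [List.foldl_cons]
    simp only
    rw [ih]
    simp only [Prod.mk.injEq]
    constructor
    · simp [pvCol]
    · rw [altMergeNZ_snd]
      simp [pvIncs]
      ring

theorem sum_flatMap_eq {α : Type} (l : List α) (f : α → List Int) :
    (l.flatMap f).sum = (l.map (fun x => (f x).sum)).sum := by
  induction l <;> simp_all

theorem main_eq (mat : List (List Int)) (hne : mat ≠ []) (hhead : mat.headD [] ≠ []) :
    merge_up mat = merge_up_alt mat := by
  have hcol : ∀ j : ℕ, mat.map (fun lst => lst.getD j 0)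
      = (List.range mat.length).map (fun i => (mat.getD i []).getD j 0) :=
    fun j => map_eq_range_getD mat [] _
  rw [merge_up, merge_up_alt]
  simp only [pvTranspose]
  rw [foldA _ _ _ (by
    intro r hr
    simp only [List.mem_map] at hr
    obtain ⟨i, _, rfl⟩ := hr
    simpa using hne)]
  rw [foldB]
  simp only [List.nil_append, zero_add]
  have hK : List.map pvCol (List.map (fun i => mat.map fun lst => lst.getD i 0)
        (List.range (mat.headD []).length))
      = List.map (fun j => pvCol ((List.range mat.length).map fun i => (mat.getD i []).getD j 0))
        (List.range (mat.headD []).length) := by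
    rw [List.map_map]
    exact List.map_congr_left (fun j _ => by simp only [Function.comp_apply, hcol j])
  rw [hK]
  have hw : (mat.headD []).length ≠ 0 := by simpa [List.length_eq_zero_iff] using hhead
  set K := List.map (fun j => pvCol ((List.range mat.length).map fun i => (mat.getD i []).getD j 0))
      (List.range (mat.headD []).length) with hKdef
  have hKne : K ≠ [] := by
    simpa [hKdef, List.map_eq_nil_iff, List.range_eq_nil] using hw
  have hKlen : K.length = (mat.headD []).length := by simp [hKdef]
  have hKmem : ∀ x ∈ K, x.length = mat.length := by
    intro x hx
    rw [hKdef] at hx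
    simp only [List.mem_map] at hx
    obtain ⟨j, _, rfl⟩ := hx
    rw [pvCol_length]
    simp
  have hhd : (K.headD []).length = mat.length := by
    rw [List.headD_eq_head?, List.head?_eq_some_head hKne]
    exact hKmem _ (List.head_mem hKne)
  have hT : (List.range (K.headD []).length).map (fun i => K.map (fun lst => lst.getD i 0))
      = (List.range mat.length).map (fun i =>
          (List.range (mat.headD []).length).map (fun j => (K.getD j []).getD i 0)) := by
    rw [hhd]
    refine List.map_congr_left (fun i _ => ?_)
    rw [map_eq_range_getD K [] (fun lst => lst.getD i 0), hKlen]
  have hS : ((List.map (fun i => mat.map fun lst => lst.getD i 0)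
        (List.range (mat.headD []).length)).flatMap pvIncs).sum
      = (List.map (fun j => (pvIncs ((List.range mat.length).map fun i =>
          (mat.getD i []).getD j 0)).sum) (List.range (mat.headD []).length)).sum := by
    rw [sum_flatMap_eq, List.map_map]
    exact congrArg _ (List.map_congr_left (fun j _ => by simp only [Function.comp_apply, hcol j]))
  rw [hT, hS]

-- ===== VERDICT (by name: the statement is the Claim_ definition above) =====
theorem merge_up_spec : Claim_equal_merge_up := by
  intro mat _hdom hpre
  unfold Spec_merge_up
  exact main_eq mat hpre.1 hpre.2.1
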